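-- pv_equiv track=rewrite | github.com/bc36/leetcode | lc_Python/weekly-contest.py | subStrHash
-- ===== SOURCE A (Python) =====
-- def subStrHash(
--     s: str, power: int, modulo: int, k: int, hashValue: int
-- ) -> str:
--     ans = m = 0
--     p, n = 1, len(s)
--     for i in range(n - 1, n - k - 1, -1):
--         m = (m * power + ord(s[i]) - 96) % modulo
--         p = p * power % modulo
--     if m == hashValue:
--         ans = n - k
--     for i in range(i - 1, -1, -1):
--         m = (m * power + ord(s[i]) - 96 - (ord(s[i + k]) - 96) * p) % modulo
--         if m == hashValue:
--             ans = i
--     return s[ans : ans + k]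
-- ===== SOURCE B (Python) =====
-- def subStrHash(s: str, power: int, modulo: int, k: int, hashValue: int) -> str:
--     # Recompute each window's hash from scratch, scanning window starts left to right
--     # and stopping at the first match (no rolling hash, no precomputed power^k).
--     # The problem guarantees 1 <= k <= len(s); validate instead of relying on it.
--     n = len(s)
--     if not 1 <= k <= n:
--         raise ValueError("k must satisfy 1 <= k <= len(s)")
--     ans = 0
--     for j in range(n - k + 1):
--         h = 0
--         for t in range(k - 1, -1, -1):
--             h = (h * power + ord(s[j + t]) - 96) % modulo
--         if h == hashValue:
--             ans = j
--             break
--     return s[ans:ans + k]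
-- ===== Notes on version B (the rewrite author's own statement) =====
-- stated objective: simpler
-- what changed: Replaces the right-to-left rolling hash (precomputed power^k correction term, overwrite-to-keep-smallest bookkeeping, second loop resuming from the first loop's index) by a direct left-to-right scan of window starts that recomputes each window's hash from scratch and breaks at the first match; B validates the problem's stated constraint 1 <= k <= len(s) and raises ValueError outside it, where A wraps negative indices or raises.
-- outside the precondition, e.g. on subStrHash('ab', 1, 7, 3, 5): A returns 'b', B raises ValueError; on subStrHash('ab', 3, 7, 3, 0): A returns 'ab', B raises ValueError
import Mathlib
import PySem

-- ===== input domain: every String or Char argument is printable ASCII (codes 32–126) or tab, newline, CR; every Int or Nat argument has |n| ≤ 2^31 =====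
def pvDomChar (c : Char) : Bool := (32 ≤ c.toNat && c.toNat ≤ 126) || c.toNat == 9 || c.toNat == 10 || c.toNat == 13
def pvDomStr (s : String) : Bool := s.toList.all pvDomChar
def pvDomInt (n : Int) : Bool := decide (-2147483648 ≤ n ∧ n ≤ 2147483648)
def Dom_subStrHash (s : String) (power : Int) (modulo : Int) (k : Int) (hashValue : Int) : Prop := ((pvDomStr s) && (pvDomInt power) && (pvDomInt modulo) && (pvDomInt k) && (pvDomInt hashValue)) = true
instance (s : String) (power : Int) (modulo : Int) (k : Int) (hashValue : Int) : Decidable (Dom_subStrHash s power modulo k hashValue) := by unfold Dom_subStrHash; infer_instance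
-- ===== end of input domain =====

-- B replaces A's right-to-left rolling hash by a plain left-to-right scan that rehashes each
-- window from scratch and stops at the first match (objective: simpler; not faster).

-- ===== PORT A =====
-- ord(c) is ported as (c.toNat : Int) (Char.toNat is the code point — exact Python ord).
-- The pyGetD default ' ' is never read under Pre_ (all indices are in range there).
-- Python's second loop starts from the leftover loop variable i of the first loop; under
-- Pre_ (1 ≤ k ≤ len(s)) that first loop is nonempty and leaves i = n - k, hence n - k - 1.
def subStrHash (s : String) (power : Int) (modulo : Int) (k : Int) (hashValue : Int) : String :=
  let cs := s.toList
  let n : Int := PySem.List.len cs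
  let mp := (PySem.List.pyRange (n - 1) (n - k - 1) (-1)).foldl
    (fun (st : Int × Int) i =>
      (PySem.Int.mod (st.1 * power + ((PySem.List.pyGetD cs i ' ').toNat : Int) - 96) modulo,
       PySem.Int.mod (st.2 * power) modulo)) (0, 1)
  let ans : Int := if mp.1 = hashValue then n - k else 0
  let ma := (PySem.List.pyRange (n - k - 1) (-1) (-1)).foldl
    (fun (st : Int × Int) i =>
      let m' := PySem.Int.mod (st.1 * power + ((PySem.List.pyGetD cs i ' ').toNat : Int) - 96
                  - (((PySem.List.pyGetD cs (i + k) ' ').toNat : Int) - 96) * mp.2) modulo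
      (m', if m' = hashValue then i else st.2)) (mp.1, ans)
  String.ofList (PySem.List.slice cs (some ma.2) (some (ma.2 + k)))

-- ===== PORT B =====
-- the inner loop of Source B: h = (h*power + ord(s[j+t]) - 96) % modulo over t in range(k-1, -1, -1)
def altWindowHash (cs : List Char) (power : Int) (modulo : Int) (j : Int) (ts : List Int) : Int :=
  ts.foldl (fun h t =>
    PySem.Int.mod (h * power + ((PySem.List.pyGetD cs (j + t) ' ').toNat : Int) - 96) modulo) 0

-- the outer loop of Source B with its break: first matching window start, else 0
def altFind (cs : List Char) (power : Int) (modulo : Int) (k : Int) (hashValue : Int) : List Int → Int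
  | [] => 0
  | j :: js =>
      if altWindowHash cs power modulo j (PySem.List.pyRange (k - 1) (-1) (-1)) = hashValue then j
      else altFind cs power modulo k hashValue js

-- Source B's 'raise ValueError' for k outside 1..len(s) has no value to port: the guard returns ""
-- there; exactly those inputs are outside Pre_ (a raise of either program is Pre_'s to exclude).
def subStrHash_alt (s : String) (power : Int) (modulo : Int) (k : Int) (hashValue : Int) : String :=
  let cs := s.toList
  let n : Int := PySem.List.len cs
  if 1 ≤ k ∧ k ≤ n then
    let ans := altFind cs power modulo k hashValue (PySem.List.pyRange 0 (n - k + 1) 1)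
    String.ofList (PySem.List.slice cs (some ans) (some (ans + k)))
  else ""

-- ===== PRECONDITION & SPEC =====
-- Pre_ = the problem's natural domain, its stated constraints: a nonzero modulus (modulo = 0
-- raises ZeroDivisionError in both programs) and a window length 1 <= k <= len(s).  Excluded
-- although A still returns there: len(s) < k <= 2*len(s), where A reads s[i] at negative i
-- (Python wraparound) and can slice from a negative ans — an accident of the implementation,
-- outside the task's stated constraints (B raises ValueError there); for k <= 0 A raises
-- UnboundLocalError and for k > 2*len(s) IndexError.
def Pre_subStrHash (s : String) (power : Int) (modulo : Int) (k : Int) (hashValue : Int) : Prop :=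
  modulo ≠ 0 ∧ 1 ≤ k ∧ k ≤ (s.toList.length : Int)
instance (s : String) (power : Int) (modulo : Int) (k : Int) (hashValue : Int) : Decidable (Pre_subStrHash s power modulo k hashValue) := by unfold Pre_subStrHash; infer_instance
def pvWitness_subStrHash : String × Int × Int × Int × Int := ("leetcode", 7, 20, 2, 0)
def Spec_subStrHash (s : String) (power : Int) (modulo : Int) (k : Int) (hashValue : Int) (out : String) : Prop := out = subStrHash_alt s power modulo k hashValue
instance (s : String) (power : Int) (modulo : Int) (k : Int) (hashValue : Int) (out : String) : Decidable (Spec_subStrHash s power modulo k hashValue out) := by unfold Spec_subStrHash; infer_instance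

-- ===== CLAIM (what is proved, stated in full; the proofs are below) =====
def Claim_equal_subStrHash : Prop := ∀ (s : String) (power : Int) (modulo : Int) (k : Int) (hashValue : Int), Dom_subStrHash s power modulo k hashValue → Pre_subStrHash s power modulo k hashValue → Spec_subStrHash s power modulo k hashValue (subStrHash s power modulo k hashValue)

-- ===== LEMMAS AND PROOFS =====

-- value of character cs[i] in the hash: ord(cs[i]) - 96
def chVal (cs : List Char) (i : Int) : Int := ((PySem.List.pyGetD cs i ' ').toNat : Int) - 96

-- raw (un-reduced) hash of the window of length kn starting at j: offset t weighs power^t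
def winHash (cs : List Char) (power : Int) (kn : Nat) (j : Int) : Int :=
  ∑ t ∈ Finset.range kn, chVal cs (j + (t : Int)) * power ^ t

-- altFind generalized to an arbitrary default (the proofs' view of both programs' answer)
def gFind (cs : List Char) (power : Int) (modulo : Int) (k : Int) (hashValue : Int)
    (d : Int) : List Int → Int
  | [] => d
  | j :: js =>
      if altWindowHash cs power modulo j (PySem.List.pyRange (k - 1) (-1) (-1)) = hashValue then j
      else gFind cs power modulo k hashValue d js

theorem pymod_sub_self_dvd (a M : Int) : M ∣ PySem.Int.mod a M - a := by
  have h := PySem.Int.floordiv_mul_add_mod a M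
  exact ⟨-(PySem.Int.floordiv a M), by linarith [h]⟩

theorem pymod_congr {a b M : Int} (hM : M ≠ 0) (h : M ∣ a - b) :
    PySem.Int.mod a M = PySem.Int.mod b M := by
  have hd : M ∣ PySem.Int.mod a M - PySem.Int.mod b M := by
    have h1 := pymod_sub_self_dvd a M
    have h2 := pymod_sub_self_dvd b M
    have : PySem.Int.mod a M - PySem.Int.mod b M
        = (PySem.Int.mod a M - a) - (PySem.Int.mod b M - b) + (a - b) := by ring
    rw [this]; exact dvd_add (dvd_sub h1 h2) h
  have habs : |PySem.Int.mod a M - PySem.Int.mod b M| < |M| := by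
    rcases lt_or_gt_of_ne hM with hneg | hpos
    · have b1 := PySem.Int.mod_neg_bounds a hneg
      have b2 := PySem.Int.mod_neg_bounds b hneg
      rw [abs_of_neg hneg]; rw [abs_lt]; constructor <;> omega
    · have a1 := PySem.Int.mod_nonneg a hpos
      have a2 := PySem.Int.mod_lt a hpos
      have b1 := PySem.Int.mod_nonneg b hpos
      have b2 := PySem.Int.mod_lt b hpos
      rw [abs_of_pos hpos]; rw [abs_lt]; constructor <;> omega
  have := Int.eq_zero_of_abs_lt_dvd ((abs_dvd _ _).mpr hd) habs
  omega

-- closed form of a descending Horner loop with a per-step Python mod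
theorem hornerDown (power M : Int) (hM : M ≠ 0) (u : Int → Int) :
    ∀ (c : Nat) (hi m0 : Int),
      (PySem.List.pyRange hi (hi - ((c : Int) + 1)) (-1)).foldl
          (fun h i => PySem.Int.mod (h * power + u i) M) m0
        = PySem.Int.mod (m0 * power ^ (c + 1)
            + ∑ t ∈ Finset.range (c + 1), u (hi - (c : Int) + (t : Int)) * power ^ t) M := by
  intro c
  induction c with
  | zero =>
      intro hi m0
      rw [PySem.List.pyRange_neg_one_cons (by omega), PySem.List.pyRange_neg_one_eq_nil (by omega)]
      simp
  | succ c ih =>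
      intro hi m0
      rw [PySem.List.pyRange_neg_one_cons (by push_cast; omega), List.foldl_cons]
      push_cast
      have harg : hi - ((c : Int) + 1 + 1) = (hi - 1) - ((c : Int) + 1) := by ring
      rw [harg, ih (hi - 1) (PySem.Int.mod (m0 * power + u hi) M)]
      apply pymod_congr hM
      have hsum : ∑ t ∈ Finset.range (c + 1 + 1), u (hi - ((c : Int) + 1) + (t : Int)) * power ^ t
          = (∑ t ∈ Finset.range (c + 1), u (hi - 1 - (c : Int) + (t : Int)) * power ^ t)
            + u hi * power ^ (c + 1) := by
        rw [Finset.sum_range_succ]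
        congr 1
        · apply Finset.sum_congr rfl
          intro t _
          congr 2
          ring
        · congr 2
          push_cast
          ring
      rw [hsum]
      have : PySem.Int.mod (m0 * power + u hi) M * power ^ (c + 1)
            + (∑ t ∈ Finset.range (c + 1), u (hi - 1 - (c : Int) + (t : Int)) * power ^ t)
          - (m0 * power ^ (c + 1 + 1)
            + ((∑ t ∈ Finset.range (c + 1), u (hi - 1 - (c : Int) + (t : Int)) * power ^ t)
              + u hi * power ^ (c + 1)))
          = (PySem.Int.mod (m0 * power + u hi) M - (m0 * power + u hi)) * power ^ (c + 1) := by
        ring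
      rw [this]
      exact Dvd.dvd.mul_right (pymod_sub_self_dvd _ M) _

-- a pairwise foldl whose components do not interact splits into two foldls
theorem foldl_pair_split (f g : Int → Int → Int) :
    ∀ (L : List Int) (p : Int × Int),
      L.foldl (fun (st : Int × Int) i => (f st.1 i, g st.2 i)) p
        = (L.foldl f p.1, L.foldl g p.2) := by
  intro L
  induction L with
  | nil => intro p; rfl
  | cons x xs ih => intro p; simpa using ih (f p.1 x, g p.2 x)

-- the inner loop of B computes the window hash reduced with Python's %
theorem altWindowHash_eq (cs : List Char) (power M k hv : Int) (j : Int)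
    (hM : M ≠ 0) (hk : 1 ≤ k) :
    altWindowHash cs power M j (PySem.List.pyRange (k - 1) (-1) (-1))
      = PySem.Int.mod (winHash cs power k.toNat j) M := by
  obtain ⟨c, hc⟩ : ∃ c : Nat, k.toNat = c + 1 := ⟨k.toNat - 1, by omega⟩
  have hkc : k = (c : Int) + 1 := by omega
  have hstep : (fun (h : Int) (t : Int) =>
        PySem.Int.mod (h * power + ((PySem.List.pyGetD cs (j + t) ' ').toNat : Int) - 96) M)
      = (fun (h : Int) (t : Int) => PySem.Int.mod (h * power + chVal cs (j + t)) M) := by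
    funext h t
    congr 1
    simp [chVal]
    ring
  have hrange : k - 1 - ((c : Int) + 1) = -1 := by omega
  unfold altWindowHash
  rw [hstep]
  have := hornerDown power M hM (fun i => chVal cs (j + i)) c (k - 1) 0
  rw [hrange] at this
  rw [this]
  apply pymod_congr hM
  have : ∑ t ∈ Finset.range (c + 1), chVal cs (j + (k - 1 - (c : Int) + (t : Int))) * power ^ t
      = winHash cs power k.toNat j := by
    rw [winHash, hc]
    apply Finset.sum_congr rfl
    intro t _
    congr 2
    omega
  rw [this]
  simp

theorem altFind_eq_gFind (cs : List Char) (power M k hv : Int) :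
    ∀ L : List Int, altFind cs power M k hv L = gFind cs power M k hv 0 L := by
  intro L
  induction L with
  | nil => rfl
  | cons j js ih => simp only [altFind, gFind, ih]

theorem gFind_append_singleton (cs : List Char) (power M k hv d j : Int) :
    ∀ L : List Int,
      gFind cs power M k hv d (L ++ [j])
        = gFind cs power M k hv
            (if altWindowHash cs power M j (PySem.List.pyRange (k - 1) (-1) (-1)) = hv then j
             else d) L := by
  intro L
  induction L with
  | nil => rfl
  | cons x xs ih => simp only [List.cons_append, gFind, ih]

-- the rolling-hash recurrence: one step left extends the window hash exactly
theorem winHash_step (cs : List Char) (power : Int) (kn : Nat) (i : Int) (hkn : 1 ≤ kn) :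
    winHash cs power kn i
      = winHash cs power kn (i + 1) * power + chVal cs i - chVal cs (i + (kn : Int)) * power ^ kn := by
  obtain ⟨c, hc⟩ : ∃ c : Nat, kn = c + 1 := ⟨kn - 1, by omega⟩
  subst hc
  rw [winHash, winHash,
      Finset.sum_range_succ' (fun t => chVal cs (i + (t : Int)) * power ^ t) c,
      Finset.sum_range_succ (fun t => chVal cs (i + 1 + (t : Int)) * power ^ t) c]
  have h1 : ∀ t ∈ Finset.range c,
      chVal cs (i + ((t + 1 : Nat) : Int)) * power ^ (t + 1)
        = chVal cs (i + 1 + (t : Int)) * power ^ t * power := by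
    intro t _
    have ht : i + ((t + 1 : Nat) : Int) = i + 1 + (t : Int) := by push_cast; ring
    rw [ht]; ring
  rw [Finset.sum_congr rfl h1, ← Finset.sum_mul]
  have h2 : i + 1 + (c : Int) = i + ((c + 1 : Nat) : Int) := by push_cast; ring
  rw [h2]
  set S := ∑ t ∈ Finset.range c, chVal cs (i + 1 + (t : Int)) * power ^ t with hS
  push_cast
  ring

-- A's second loop: given m ≡ winHash(c) and p ≡ power^kn, its ans is B's scan with default ansIn
theorem loop2_spec (cs : List Char) (power M k hv p : Int) (hM : M ≠ 0) (hk : 1 ≤ k)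
    (hp : M ∣ p - power ^ k.toNat) :
    ∀ (c : Nat) (m ansIn : Int), M ∣ m - winHash cs power k.toNat (c : Int) →
      ((PySem.List.pyRange ((c : Int) - 1) (-1) (-1)).foldl
          (fun (st : Int × Int) i =>
            (PySem.Int.mod (st.1 * power + ((PySem.List.pyGetD cs i ' ').toNat : Int) - 96
                - (((PySem.List.pyGetD cs (i + k) ' ').toNat : Int) - 96) * p) M,
             if PySem.Int.mod (st.1 * power + ((PySem.List.pyGetD cs i ' ').toNat : Int) - 96
                  - (((PySem.List.pyGetD cs (i + k) ' ').toNat : Int) - 96) * p) M = hv then i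
             else st.2)) (m, ansIn)).2
        = gFind cs power M k hv ansIn (PySem.List.pyRange 0 (c : Int) 1) := by
  intro c
  induction c with
  | zero =>
      intro m ansIn _
      rw [PySem.List.pyRange_neg_one_eq_nil (by omega), PySem.List.pyRange_one_eq_nil (by omega)]
      rfl
  | succ c ih =>
      intro m ansIn hm
      rw [show (((c + 1 : Nat) : Int) - 1) = (c : Int) by push_cast; ring]
      rw [PySem.List.pyRange_neg_one_cons (by omega), List.foldl_cons]
      set m' := PySem.Int.mod ((m * power + ((PySem.List.pyGetD cs (c : Int) ' ').toNat : Int)) - 96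
                  - (((PySem.List.pyGetD cs ((c : Int) + k) ' ').toNat : Int) - 96) * p) M with hm'
      have harg : (m * power + ((PySem.List.pyGetD cs (c : Int) ' ').toNat : Int)) - 96
                  - (((PySem.List.pyGetD cs ((c : Int) + k) ' ').toNat : Int) - 96) * p
          = m * power + chVal cs (c : Int) - chVal cs ((c : Int) + k) * p := by
        simp [chVal]; ring
      have hcong : M ∣ (m * power + chVal cs (c : Int) - chVal cs ((c : Int) + k) * p)
          - winHash cs power k.toNat (c : Int) := by
        have hw := winHash_step cs power k.toNat (c : Int) (by omega)
        have hkc : (c : Int) + (k.toNat : Int) = (c : Int) + k := by omega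
        rw [hkc] at hw
        obtain ⟨a, ha⟩ := hm
        obtain ⟨b, hb⟩ := hp
        refine ⟨a * power - chVal cs ((c : Int) + k) * b, ?_⟩
        have hcast : ((c + 1 : Nat) : Int) = (c : Int) + 1 := by push_cast; ring
        rw [hcast] at ha
        calc m * power + chVal cs (c : Int) - chVal cs ((c : Int) + k) * p
              - winHash cs power k.toNat (c : Int)
            = (m - winHash cs power k.toNat ((c : Int) + 1)) * power
              - chVal cs ((c : Int) + k) * (p - power ^ k.toNat)
              + (winHash cs power k.toNat ((c : Int) + 1) * power + chVal cs (c : Int)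
                 - chVal cs ((c : Int) + k) * power ^ k.toNat
                 - winHash cs power k.toNat (c : Int)) := by ring
          _ = M * (a * power - chVal cs ((c : Int) + k) * b) := by rw [ha, hb, hw]; ring
      have hm'w : M ∣ m' - winHash cs power k.toNat (c : Int) := by
        rw [hm', harg]
        have h1 := pymod_sub_self_dvd (m * power + chVal cs (c : Int) - chVal cs ((c : Int) + k) * p) M
        have hsplit : PySem.Int.mod (m * power + chVal cs (c : Int) - chVal cs ((c : Int) + k) * p) M
              - winHash cs power k.toNat (c : Int)
            = (PySem.Int.mod (m * power + chVal cs (c : Int) - chVal cs ((c : Int) + k) * p) M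
                - (m * power + chVal cs (c : Int) - chVal cs ((c : Int) + k) * p))
              + ((m * power + chVal cs (c : Int) - chVal cs ((c : Int) + k) * p)
                - winHash cs power k.toNat (c : Int)) := by ring
        rw [hsplit]
        exact dvd_add h1 hcong
      have hcond : (m' = hv) ↔
          (altWindowHash cs power M (c : Int) (PySem.List.pyRange (k - 1) (-1) (-1)) = hv) := by
        rw [altWindowHash_eq cs power M k hv (c : Int) hM hk]
        have : m' = PySem.Int.mod (winHash cs power k.toNat (c : Int)) M := by
          rw [hm', harg]
          exact pymod_congr hM hcong
        rw [this]
      rw [ih m' (if m' = hv then (c : Int) else ansIn) hm'w]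
      rw [show ((c + 1 : Nat) : Int) = (c : Int) + 1 by push_cast; ring,
          PySem.List.pyRange_one_succ_right (by omega),
          gFind_append_singleton]
      congr 1
      by_cases h : m' = hv
      · rw [if_pos h, if_pos (hcond.mp h)]
      · rw [if_neg h, if_neg (fun hh => h (hcond.mpr hh))]

-- ===== VERDICT (by name: the statement is the Claim_ definition above) =====
theorem subStrHash_spec : Claim_equal_subStrHash := by
  intro s power M k hv _ hpre
  obtain ⟨hM, hk1, hkn⟩ := hpre
  unfold Spec_subStrHash
  simp only [subStrHash, subStrHash_alt, PySem.List.len_eq]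
  set cs := s.toList with hcs
  rw [if_pos (⟨hk1, hkn⟩ : 1 ≤ k ∧ k ≤ (cs.length : Int))]
  obtain ⟨c, hc⟩ : ∃ c : Nat, k.toNat = c + 1 := ⟨k.toNat - 1, by omega⟩
  have hkc : ((k.toNat : Int)) = k := Int.toNat_of_nonneg (by omega)
  -- the first loop of A: window hash of the last window, and power^k, both reduced mod modulo
  have hmp : (PySem.List.pyRange ((cs.length : Int) - 1) ((cs.length : Int) - k - 1) (-1)).foldl
        (fun (st : Int × Int) i =>
          (PySem.Int.mod (st.1 * power + ((PySem.List.pyGetD cs i ' ').toNat : Int) - 96) M,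
           PySem.Int.mod (st.2 * power) M)) (0, 1)
      = (PySem.Int.mod (winHash cs power k.toNat ((cs.length : Int) - k)) M,
         PySem.Int.mod (power ^ k.toNat) M) := by
    rw [foldl_pair_split
      (fun h i => PySem.Int.mod (h * power + ((PySem.List.pyGetD cs i ' ').toNat : Int) - 96) M)
      (fun p i => PySem.Int.mod (p * power) M)]
    rw [Prod.mk.injEq]
    constructor
    · have hstep : (fun (h i : Int) =>
            PySem.Int.mod (h * power + ((PySem.List.pyGetD cs i ' ').toNat : Int) - 96) M)
          = (fun (h i : Int) => PySem.Int.mod (h * power + chVal cs i) M) := by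
        funext h i
        congr 1
        simp [chVal]
        ring
      rw [hstep, show (cs.length : Int) - k - 1 = ((cs.length : Int) - 1) - ((c : Int) + 1) by omega,
          hornerDown power M hM (chVal cs) c ((cs.length : Int) - 1) 0]
      apply pymod_congr hM
      have hsum : ∑ t ∈ Finset.range (c + 1),
            chVal cs ((cs.length : Int) - 1 - (c : Int) + (t : Int)) * power ^ t
          = winHash cs power k.toNat ((cs.length : Int) - k) := by
        rw [winHash, hc]
        apply Finset.sum_congr rfl
        intro t _
        congr 2
        omega
      rw [hsum]
      simp
    · have hstep : (fun (p i : Int) => PySem.Int.mod (p * power) M)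
          = (fun (p i : Int) => PySem.Int.mod (p * power + (fun (_ : Int) => (0 : Int)) i) M) := by
        funext p i
        simp
      rw [hstep, show (cs.length : Int) - k - 1 = ((cs.length : Int) - 1) - ((c : Int) + 1) by omega,
          hornerDown power M hM (fun _ => (0 : Int)) c ((cs.length : Int) - 1) 1]
      congr 1
      simp [hc]
  simp only [hmp]
  -- the second loop of A, via loop2_spec
  set c2 : Nat := ((cs.length : Int) - k).toNat with hc2def
  have hc2 : ((c2 : Int)) = (cs.length : Int) - k := by omega
  have hp : M ∣ PySem.Int.mod (power ^ k.toNat) M - power ^ k.toNat :=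
    pymod_sub_self_dvd _ M
  have hinv : M ∣ PySem.Int.mod (winHash cs power k.toNat ((cs.length : Int) - k)) M
      - winHash cs power k.toNat ((c2 : Int)) := by
    rw [hc2]
    exact pymod_sub_self_dvd _ M
  rw [show ((cs.length : Int) - k - 1) = ((c2 : Int)) - 1 by omega]
  rw [loop2_spec cs power M k hv (PySem.Int.mod (power ^ k.toNat) M) hM hk1 hp c2
      (PySem.Int.mod (winHash cs power k.toNat ((cs.length : Int) - k)) M)
      (if PySem.Int.mod (winHash cs power k.toNat ((cs.length : Int) - k)) M = hv
       then (cs.length : Int) - k else 0) hinv]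
  -- the B side: peel the last window start off the scan
  rw [altFind_eq_gFind, PySem.List.pyRange_one_succ_right (by omega : (0 : Int) ≤ (cs.length : Int) - k),
      gFind_append_singleton, hc2,
      altWindowHash_eq cs power M k hv ((cs.length : Int) - k) hM hk1]
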